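-- pv_equiv track=rewrite | github.com/ByteAndConquer/receipt-designer | receipt_designer/core/barcodes.py | _validate_gs1_like
-- ===== SOURCE A (Python) =====
-- class BarcodeValidationError(Exception):
--     """Raised when barcode data is invalid for the selected symbology."""
--     pass
--
-- def _validate_gs1_like(data: str) -> str:
--     """
--     Very light-weight GS1 syntax checker for:
--       - GS1-128
--       - GS1 DataMatrix
--
--     We support either:
--       - raw FNC1-separated data (we don't see the FNC1 here), or
--       - AI in parentheses: (01)12345678901231(17)250101(10)BATCH1
--
--     This is intentionally not a full GS1 validator; it just catches
--     obviously broken AI syntax and absurd length.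
--     """
--     data = data or ""
--     if not data.strip():
--         raise BarcodeValidationError("GS1 data cannot be empty.")
--
--     # Soft length cap
--     if len(data) > 512:
--         raise BarcodeValidationError("GS1 data too long (>512 characters).")
--
--     # If no parentheses at all, accept as-is (could be FNC1-separated/operator-specific).
--     if "(" not in data and ")" not in data:
--         return data
--
--     # Basic AI syntax check: '(AI)' where AI is 2–4 digits.
--     depth = 0
--     i = 0
--     while i < len(data):
--         ch = data[i]
--         if ch == "(":
--             depth += 1
--             j = i + 1
--             ai_digits: list[str] = []
--             while j < len(data) and data[j].isdigit():
--                 ai_digits.append(data[j])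
--                 j += 1
--             if not ai_digits or not (2 <= len(ai_digits) <= 4) or j >= len(data) or data[j] != ")":
--                 raise BarcodeValidationError(
--                     "GS1 AI syntax looks invalid near position "
--                     f"{i}. Expected '(AI)' where AI is 2–4 digits, e.g. (01), (17), (10)."
--                 )
--         elif ch == ")":
--             depth -= 1
--             if depth < 0:
--                 raise BarcodeValidationError("Unbalanced ')' in GS1 data.")
--         i += 1
--
--     if depth != 0:
--         raise BarcodeValidationError("Unbalanced '(' / ')' in GS1 data.")
--
--     return data
-- ===== SOURCE B (Python) =====
-- class BarcodeValidationError(Exception):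
--     """Raised when barcode data is invalid for the selected symbology."""
--     pass
--
-- def _validate_gs1_like(data: str) -> str:
--     # Group-consuming scan: on '(' match the whole '(AI)' group by slice
--     # comparison and jump past it, so no depth counter is needed; any ')'
--     # seen by the scan is then necessarily stray.
--     data = data or ""
--     if not data.strip():
--         raise BarcodeValidationError("GS1 data cannot be empty.")
--
--     if len(data) > 512:
--         raise BarcodeValidationError("GS1 data too long (>512 characters).")
--
--     if "(" not in data and ")" not in data:
--         return data
--
--     i = 0
--     while i < len(data):
--         ch = data[i]
--         if ch == "(":
--             for k in (2, 3, 4):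
--                 if data[i + 1 : i + 1 + k].isdigit() and data[i + 1 + k : i + 2 + k] == ")":
--                     i += k + 2
--                     break
--             else:
--                 raise BarcodeValidationError(
--                     "GS1 AI syntax looks invalid near position "
--                     f"{i}. Expected '(AI)' where AI is 2–4 digits, e.g. (01), (17), (10)."
--                 )
--         elif ch == ")":
--             raise BarcodeValidationError("Unbalanced ')' in GS1 data.")
--         else:
--             i += 1
--
--     return data
-- ===== Notes on version B (the rewrite author's own statement) =====
-- stated objective: alternative
-- what changed: Replaced A's depth-counting char-by-char walk (with an inner digit-collecting loop and a final balance check) by a group-consuming scan: on '(' it matches the whole '(AI)' group by slice comparison for k in (2,3,4) and jumps past it, so no depth counter exists and any ')' the scan sees is immediately stray.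
import Mathlib
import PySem

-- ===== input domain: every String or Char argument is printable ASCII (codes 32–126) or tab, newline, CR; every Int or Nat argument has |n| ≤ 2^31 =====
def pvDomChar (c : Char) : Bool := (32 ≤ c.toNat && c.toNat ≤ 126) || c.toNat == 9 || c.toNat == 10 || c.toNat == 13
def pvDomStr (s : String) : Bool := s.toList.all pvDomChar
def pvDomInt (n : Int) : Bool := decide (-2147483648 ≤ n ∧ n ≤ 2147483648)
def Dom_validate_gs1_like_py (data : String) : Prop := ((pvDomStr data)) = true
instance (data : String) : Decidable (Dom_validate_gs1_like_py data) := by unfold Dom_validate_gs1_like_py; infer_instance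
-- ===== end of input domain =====

-- B replaces A's depth-counting char-by-char walk by a group-consuming scan (match the whole '(AI)' by
-- slice comparison and jump past it; no depth counter) — objective: alternative, same O(n) cost.
-- A raises BarcodeValidationError on empty/too-long/ill-formed input; those inputs are outside Pre_ and
-- both ports return "" there (the raise has no return value).

-- ===== PORT A =====
-- inner `while j < len(data) and data[j].isdigit()` collecting ai_digits
def pvACollect (s : List Char) (j : Nat) (acc : List Char) : Nat × List Char :=
  if h : j < s.length then
    if PySem.Chars.isdigit s[j] then pvACollect s (j + 1) (acc ++ [s[j]])
    else (j, acc)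
  else (j, acc)
termination_by s.length - j

-- the main `while i < len(data)` walk with its depth counter; `false` = the raise branches
def pvALoop (s : List Char) (i : Nat) (depth : Int) : Bool :=
  if h : i < s.length then
    let ch := s[i]
    if ch = '(' then
      let r := pvACollect s (i + 1) []
      if r.2 = [] ∨ ¬(2 ≤ r.2.length ∧ r.2.length ≤ 4) ∨ s.length ≤ r.1 ∨ s[r.1]? ≠ some ')' then
        false
      else pvALoop s (i + 1) (depth + 1)
    else if ch = ')' then
      if depth - 1 < 0 then false else pvALoop s (i + 1) (depth - 1)
    else pvALoop s (i + 1) depth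
  else decide (depth = 0)
termination_by s.length - i

def validate_gs1_like_py (data : String) : String :=
  -- `data = data or ""` is the identity on str input; raises are modeled as ""
  if PySem.Str.strip data = "" then ""
  else if 512 < PySem.Str.len data then ""
  else if PySem.Str.isIn "(" data = false ∧ PySem.Str.isIn ")" data = false then data
  else if pvALoop data.toList 0 0 then data else ""

-- ===== PORT B =====
-- `data[i+1:i+1+k].isdigit() and data[i+1+k:i+2+k] == ")"`
def pvBGrp (s : List Char) (i k : Nat) : Bool :=
  PySem.Chars.strIsdigit (PySem.List.slice s (some ((i : Int) + 1)) (some ((i : Int) + 1 + (k : Int)))) &&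
  (PySem.List.slice s (some ((i : Int) + 1 + (k : Int))) (some ((i : Int) + 2 + (k : Int))) == [')'])

-- the `while i < n` scan: a matched group is skipped whole, any ')' seen is stray
def pvBLoop (s : List Char) (i : Nat) : Bool :=
  if h : i < s.length then
    let ch := s[i]
    if ch = '(' then
      if pvBGrp s i 2 then pvBLoop s (i + 2 + 2)
      else if pvBGrp s i 3 then pvBLoop s (i + 3 + 2)
      else if pvBGrp s i 4 then pvBLoop s (i + 4 + 2)
      else false
    else if ch = ')' then false
    else pvBLoop s (i + 1)
  else true
termination_by s.length - i

def validate_gs1_like_py_alt (data : String) : String :=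
  if PySem.Str.strip data = "" then ""
  else if 512 < PySem.Str.len data then ""
  else if PySem.Str.isIn "(" data = false ∧ PySem.Str.isIn ")" data = false then data
  else if pvBLoop data.toList 0 then data else ""

-- ===== PRECONDITION & SPEC =====
-- Pre_ = exactly the inputs on which Python A returns (no BarcodeValidationError): nonempty after strip,
-- ≤ 512 chars, every '(' opens a '(2–4 digits)' group and every ')' closes one.
def pvD (s : List Char) (j : Nat) : Bool :=
  if h : j < s.length then PySem.Chars.isdigit s[j] else false

def pvOpenOkP (s : List Char) (i : Nat) : Prop :=
  ∃ k < 5, 2 ≤ k ∧ (∀ m < k, pvD s (i + 1 + m) = true) ∧ s[i + 1 + k]? = some ')'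

def pvCloseOkP (s : List Char) (j : Nat) : Prop :=
  ∃ k < 5, 2 ≤ k ∧ k + 1 ≤ j ∧ s[j - k - 1]? = some '(' ∧ ∀ m < k, pvD s (j - k + m) = true

def Pre_validate_gs1_like_py (data : String) : Prop :=
  ¬ (PySem.Str.strip data = "") ∧ data.toList.length ≤ 512 ∧
  ∀ i < data.toList.length,
    (data.toList[i]? = some '(' → pvOpenOkP data.toList i) ∧
    (data.toList[i]? = some ')' → pvCloseOkP data.toList i)
instance (data : String) : Decidable (Pre_validate_gs1_like_py data) := by
  unfold Pre_validate_gs1_like_py pvOpenOkP pvCloseOkP; infer_instance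

def pvWitness_validate_gs1_like_py : String := "(01)12345678901231(10)BATCH1"

def Spec_validate_gs1_like_py (data : String) (out : String) : Prop := out = validate_gs1_like_py_alt data
instance (data : String) (out : String) : Decidable (Spec_validate_gs1_like_py data out) := by unfold Spec_validate_gs1_like_py; infer_instance

-- ===== CLAIM (what is proved, stated in full; the proofs are below) =====
def Claim_equal_validate_gs1_like_py : Prop := ∀ (data : String), Dom_validate_gs1_like_py data → Pre_validate_gs1_like_py data → Spec_validate_gs1_like_py data (validate_gs1_like_py data)

-- ===== LEMMAS AND PROOFS =====

-- length of the maximal digit run starting at j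
def pvRun (s : List Char) (j : Nat) : Nat :=
  if h : j < s.length then
    if PySem.Chars.isdigit s[j] then pvRun s (j + 1) + 1 else 0
  else 0
termination_by s.length - j

theorem pvD_true_iff (s : List Char) (j : Nat) :
    pvD s j = true ↔ ∃ h : j < s.length, PySem.Chars.isdigit s[j] = true := by
  unfold pvD; split <;> simp_all

theorem pvD_of_close (s : List Char) (p : Nat) (h : s[p]? = some ')') : pvD s p = false := by
  obtain ⟨hl, he⟩ := List.getElem?_eq_some_iff.mp h
  unfold pvD; simp [hl, he, PySem.Chars.isdigit]

theorem pvRun_digit (s : List Char) : ∀ n j m, s.length - j ≤ n → m < pvRun s j → pvD s (j + m) = true := by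
  intro n
  induction n with
  | zero => intro j m hn hm; unfold pvRun at hm; rw [dif_neg (by omega)] at hm; omega
  | succ n ih =>
    intro j m hn hm
    unfold pvRun at hm
    by_cases hj : j < s.length
    · rw [dif_pos hj] at hm
      by_cases hd : PySem.Chars.isdigit s[j]
      · rw [if_pos hd] at hm
        match m with
        | 0 => unfold pvD; simp [hj, hd]
        | m + 1 =>
          have := ih (j + 1) m (by omega) (by omega)
          simpa [Nat.add_assoc, Nat.add_comm 1 m] using this
      · rw [if_neg hd] at hm; omega
    · rw [dif_neg hj] at hm; omega

theorem pvRun_stop (s : List Char) : ∀ n j, s.length - j ≤ n → pvD s (j + pvRun s j) = false := by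
  intro n
  induction n with
  | zero =>
    intro j hn
    unfold pvRun; rw [dif_neg (by omega)]
    unfold pvD; rw [dif_neg (by omega)]
  | succ n ih =>
    intro j hn
    unfold pvRun
    by_cases hj : j < s.length
    · rw [dif_pos hj]
      by_cases hd : PySem.Chars.isdigit s[j]
      · rw [if_pos hd]
        have := ih (j + 1) (by omega)
        simpa [Nat.add_assoc, Nat.add_comm 1 (pvRun s (j+1))] using this
      · rw [if_neg hd]
        unfold pvD; simp [hj, hd]
    · rw [dif_neg hj]
      unfold pvD; rw [dif_neg (by omega)]

theorem pvRun_eq (s : List Char) (j k : Nat)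
    (hd : ∀ m < k, pvD s (j + m) = true) (hs : pvD s (j + k) = false) : pvRun s j = k := by
  rcases Nat.lt_trichotomy (pvRun s j) k with h | h | h
  · have := hd _ h
    have := pvRun_stop s (s.length - j) j le_rfl
    simp_all
  · exact h
  · have := pvRun_digit s (s.length - j) j k le_rfl h
    simp_all

theorem pvACollect_spec (s : List Char) :
    ∀ n j acc, s.length - j ≤ n →
      (pvACollect s j acc).1 = j + pvRun s j ∧ (pvACollect s j acc).2.length = acc.length + pvRun s j := by
  intro n
  induction n with
  | zero =>
    intro j acc hn
    unfold pvACollect pvRun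
    rw [dif_neg (by omega), dif_neg (by omega)]
    simp
  | succ n ih =>
    intro j acc hn
    unfold pvACollect pvRun
    by_cases hj : j < s.length
    · rw [dif_pos hj, dif_pos hj]
      by_cases hd : PySem.Chars.isdigit s[j]
      · rw [if_pos hd, if_pos hd]
        have := ih (j + 1) (acc ++ [s[j]]) (by omega)
        constructor
        · omega
        · simp at this; omega
      · rw [if_neg hd, if_neg hd]; simp
    · rw [dif_neg hj, dif_neg hj]; simp

theorem take_one_drop (s : List Char) (n : Nat) (c : Char) :
    (s.drop n).take 1 = [c] ↔ s[n]? = some c := by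
  rcases h : s[n]? with _ | d
  · have : s.length ≤ n := by simpa using List.getElem?_eq_none_iff.mp h
    simp [List.drop_eq_nil_of_le this]
  · obtain ⟨hl, he⟩ := List.getElem?_eq_some_iff.mp h
    rw [List.drop_eq_getElem_cons hl]
    simp [he]

theorem pvBGrp_char (s : List Char) (i k : Nat) (hk : 2 ≤ k) :
    pvBGrp s i k = true ↔ (∀ m < k, pvD s (i + 1 + m) = true) ∧ s[i + 1 + k]? = some ')' := by
  unfold pvBGrp
  have e1 : (i : Int) + 1 = ((i + 1 : Nat) : Int) := by push_cast; ring
  have e2 : (i : Int) + 1 + (k : Int) = ((i + 1 + k : Nat) : Int) := by push_cast; ring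
  have e3 : (i : Int) + 2 + (k : Int) = ((i + 2 + k : Nat) : Int) := by push_cast; ring
  rw [e3, e2, e1, PySem.List.slice_natCast, PySem.List.slice_natCast]
  have et : i + 1 + k - (i + 1) = k := by omega
  have et2 : i + 2 + k - (i + 1 + k) = 1 := by omega
  rw [et, et2]
  rw [Bool.and_eq_true, beq_iff_eq, take_one_drop]
  constructor
  · rintro ⟨hd, hc⟩
    refine ⟨?_, hc⟩
    intro m hm
    have hlen : i + 1 + k < s.length := (List.getElem?_eq_some_iff.mp hc).1
    unfold PySem.Chars.strIsdigit at hd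
    rw [Bool.and_eq_true, List.all_eq_true] at hd
    have hmlt : m < ((s.drop (i + 1)).take k).length := by simp; omega
    have hmem : s[i + 1 + m]'(by omega) ∈ (s.drop (i + 1)).take k := by
      have : ((s.drop (i + 1)).take k)[m]'hmlt = s[i + 1 + m]'(by omega) := by
        rw [List.getElem_take, List.getElem_drop]
      rw [← this]
      exact List.getElem_mem hmlt
    have := hd.2 _ hmem
    unfold pvD
    rw [dif_pos (by omega)]
    exact this
  · rintro ⟨hd, hc⟩
    refine ⟨?_, hc⟩
    have hlen : i + 1 + k < s.length := (List.getElem?_eq_some_iff.mp hc).1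
    unfold PySem.Chars.strIsdigit
    rw [Bool.and_eq_true, List.all_eq_true]
    have hlt : ((s.drop (i + 1)).take k).length = k := by
      simp; omega
    constructor
    · simp [← List.length_eq_zero_iff, hlt]; omega
    · intro c hc'
      obtain ⟨m, hm, he⟩ := List.mem_iff_getElem.mp hc'
      rw [hlt] at hm
      have : ((s.drop (i + 1)).take k)[m]'(by rw [hlt]; exact hm) = s[i + 1 + m]'(by omega) := by
        rw [List.getElem_take, List.getElem_drop]
      rw [this] at he
      have := hd m hm
      unfold pvD at this
      rw [dif_pos (by omega)] at this
      rw [← he]; exact this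

-- skipping a validated group: m digits then ')' — A walks them one by one, depth returning to d
theorem pvALoop_skip (s : List Char) :
    ∀ m p d, 0 ≤ d → (∀ t < m, pvD s (p + t) = true) → s[p + m]? = some ')' →
      pvALoop s p (d + 1) = pvALoop s (p + m + 1) d := by
  intro m
  induction m with
  | zero =>
    intro p d hd _ hc
    obtain ⟨hl, he⟩ := List.getElem?_eq_some_iff.mp (by simpa using hc)
    rw [pvALoop]
    rw [dif_pos hl]
    simp only [he]
    rw [if_neg (by decide)]
    simp only [if_true]
    rw [if_neg (by omega : ¬ (d + 1 - 1 < 0))]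
    norm_num
  | succ m ih =>
    intro p d hd hdig hc
    have h0 := hdig 0 (by omega)
    simp only [Nat.add_zero] at h0
    obtain ⟨hl, hdg⟩ := (pvD_true_iff s p).mp h0
    rw [pvALoop, dif_pos hl]
    have hne1 : s[p] ≠ '(' := by
      intro he; rw [he] at hdg; simp [PySem.Chars.isdigit] at hdg
    have hne2 : s[p] ≠ ')' := by
      intro he; rw [he] at hdg; simp [PySem.Chars.isdigit] at hdg
    simp only [if_neg hne1, if_neg hne2]
    have := ih (p + 1) d hd (fun t ht => by
        have := hdig (t + 1) (by omega)
        simpa [Nat.add_assoc, Nat.add_comm 1 t] using this)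
      (by simpa [Nat.add_assoc, Nat.add_comm 1 m] using hc)
    rw [this]
    congr 1
    omega

theorem pvD_false_of_close (s : List Char) (p : Nat) (h : s[p]? = some ')') : pvD s p = false :=
  pvD_of_close s p h

theorem pvLoop_eq (s : List Char) : ∀ n i, s.length - i ≤ n → pvALoop s i 0 = pvBLoop s i := by
  intro n
  induction n with
  | zero =>
    intro i hn
    rw [pvALoop, pvBLoop, dif_neg (by omega), dif_neg (by omega)]
    norm_num
  | succ n ih =>
    intro i hn
    by_cases hi : i < s.length
    · rw [pvALoop, pvBLoop, dif_pos hi, dif_pos hi]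
      by_cases hop : s[i] = '('
      · simp only [if_pos hop]
        obtain ⟨hr1, hr2⟩ := pvACollect_spec s (s.length - (i + 1)) (i + 1) [] le_rfl
        simp only [List.length_nil, Nat.zero_add] at hr2
        by_cases hV : 2 ≤ pvRun s (i + 1) ∧ pvRun s (i + 1) ≤ 4 ∧ s[i + 1 + pvRun s (i + 1)]? = some ')'
        · obtain ⟨hv1, hv2, hv3⟩ := hV
          have hlt : i + 1 + pvRun s (i + 1) < s.length := (List.getElem?_eq_some_iff.mp hv3).1
          rw [if_neg (by
            push Not
            refine ⟨?_, ⟨by omega, by omega⟩, by omega, ?_⟩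
            · intro he; rw [← List.length_eq_zero_iff, hr2] at he; omega
            · rw [hr1, hv3])]
          have hskip := pvALoop_skip s (pvRun s (i + 1)) (i + 1) 0 le_rfl
            (fun t ht => pvRun_digit s (s.length - (i + 1)) (i + 1) t le_rfl ht) hv3
          rw [hskip]
          have hije := ih (i + 1 + pvRun s (i + 1) + 1) (by omega)
          rw [hije]
          have hgrp : pvBGrp s i (pvRun s (i + 1)) = true := by
            rw [pvBGrp_char s i (pvRun s (i + 1)) hv1]
            exact ⟨fun m hm => pvRun_digit s (s.length - (i + 1)) (i + 1) m le_rfl hm, hv3⟩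
          have hgrplt : ∀ k, 2 ≤ k → k < pvRun s (i + 1) → pvBGrp s i k = false := by
            intro k hk2 hkr
            rw [Bool.eq_false_iff]
            intro htr
            have := ((pvBGrp_char s i k hk2).mp htr).2
            have hdig := pvRun_digit s (s.length - (i + 1)) (i + 1) k le_rfl hkr
            have := pvD_false_of_close s (i + 1 + k) this
            simp_all
          interval_cases h : pvRun s (i + 1)
          · rw [if_pos hgrp]
          · rw [if_neg (by simpa using hgrplt 2 (by omega) (by omega)), if_pos hgrp]
          · rw [if_neg (by simpa using hgrplt 2 (by omega) (by omega)),
                if_neg (by simpa using hgrplt 3 (by omega) (by omega)), if_pos hgrp]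
        · have hgf : ∀ k, 2 ≤ k → k ≤ 4 → pvBGrp s i k = false := by
            intro k hk2 hk4
            rw [Bool.eq_false_iff]
            intro htr
            obtain ⟨hdig, hcl⟩ := (pvBGrp_char s i k hk2).mp htr
            have hrk : pvRun s (i + 1) = k :=
              pvRun_eq s (i + 1) k hdig (pvD_false_of_close s (i + 1 + k) hcl)
            exact hV ⟨by omega, by omega, by rw [hrk]; exact hcl⟩
          rw [if_pos (by
            by_cases h2 : 2 ≤ pvRun s (i + 1) ∧ pvRun s (i + 1) ≤ 4
            · right; right
              have : ¬ s[i + 1 + pvRun s (i + 1)]? = some ')' := fun hcl => hV ⟨h2.1, h2.2, hcl⟩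
              by_cases h3 : s.length ≤ (pvACollect s (i + 1) []).1
              · left; exact h3
              · right; rw [hr1]; exact this
            · right; left; rw [hr2]; exact h2)]
          rw [if_neg (by simpa using hgf 2 (by omega) (by omega)),
              if_neg (by simpa using hgf 3 (by omega) (by omega)),
              if_neg (by simpa using hgf 4 (by omega) (by omega))]
      · simp only [if_neg hop]
        by_cases hcl : s[i] = ')'
        · simp only [if_pos hcl]
          rw [if_pos (by norm_num : (0 : Int) - 1 < 0)]
        · simp only [if_neg hcl]
          exact ih (i + 1) (by omega)
    · rw [pvALoop, pvBLoop, dif_neg hi, dif_neg hi]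
      norm_num

theorem pvPorts_eq (data : String) : validate_gs1_like_py data = validate_gs1_like_py_alt data := by
  unfold validate_gs1_like_py validate_gs1_like_py_alt
  rw [pvLoop_eq data.toList (data.toList.length) 0 (by omega)]

-- ===== VERDICT (by name: the statement is the Claim_ definition above) =====
theorem validate_gs1_like_py_spec : Claim_equal_validate_gs1_like_py := by
  intro data _ _
  unfold Spec_validate_gs1_like_py
  exact pvPorts_eq data
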